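-- pv_equiv track=rewrite | github.com/Tosinibikunle/My-Dsa | trionic_array_2.py | maxSumTrionic
-- ===== SOURCE A (Python) =====
-- def maxSumTrionic(nums):
--
--     n = len(nums)
--     res = -10**16
--
--     i = 1
--     while i < n - 2:
--
--         a = b = i
--         net = nums[a]
--
--         while b + 1 < n and nums[b + 1] < nums[b]:
--             net += nums[b + 1]
--             b += 1
--
--         if a == b:
--             i += 1
--             continue
--
--         c = b
--
--         left = right = 0
--         lx = rx = -10**18
--
--         while a - 1 >= 0 and nums[a - 1] < nums[a]:
--             left += nums[a - 1]
--             lx = max(lx, left)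
--             a -= 1
--
--         if a == i:
--             i += 1
--             continue
--
--         while b + 1 < n and nums[b + 1] > nums[b]:
--             right += nums[b + 1]
--             rx = max(rx, right)
--             b += 1
--
--         if b == c:
--             i += 1
--             continue
--
--         res = max(res, lx + net + rx)
--         i = b
--
--     return res
-- ===== SOURCE B (Python) =====
-- def maxSumTrionic(nums):
--     # O(n): precompute best increasing-segment sums ending/starting at each index
--     # and the descending-run end/sum, then scan peaks once.
--     n = len(nums)
--     res = -10**16
--     if n < 4:
--         return res
--     best = [0] * n          # best[i]: max sum of a strictly-increasing segment ending at i
--     best[0] = nums[0]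
--     for i in range(1, n):
--         best[i] = nums[i] + (best[i-1] if nums[i-1] < nums[i] and best[i-1] > 0 else 0)
--     rgt = [0] * n           # rgt[i]: max sum of a strictly-increasing segment starting at i
--     dn = [0] * n            # dn[i]: sum of the maximal strictly-decreasing run starting at i
--     de = [0] * n            # de[i]: end index of that run
--     rgt[n-1] = dn[n-1] = nums[n-1]
--     de[n-1] = n - 1
--     for i in range(n-2, -1, -1):
--         rgt[i] = nums[i] + (rgt[i+1] if nums[i] < nums[i+1] and rgt[i+1] > 0 else 0)
--         if nums[i+1] < nums[i]:
--             dn[i] = nums[i] + dn[i+1]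
--             de[i] = de[i+1]
--         else:
--             dn[i] = nums[i]
--             de[i] = i
--     for s in range(1, n-2):
--         if nums[s-1] < nums[s] and nums[s+1] < nums[s]:
--             e = de[s]
--             if e + 1 < n and nums[e+1] > nums[e]:
--                 res = max(res, best[s-1] + dn[s] + rgt[e+1])
--     return res
-- ===== Notes on version B (the rewrite author's own statement) =====
-- stated objective: faster
-- what changed: A restarts nested while-loop scans at every index (re-scanning whole descending/ascending runs); B makes one O(n) pass precomputing best increasing-segment sums ending/starting at each index plus descending-run ends/sums, then evaluates each peak once.
import Mathlib
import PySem

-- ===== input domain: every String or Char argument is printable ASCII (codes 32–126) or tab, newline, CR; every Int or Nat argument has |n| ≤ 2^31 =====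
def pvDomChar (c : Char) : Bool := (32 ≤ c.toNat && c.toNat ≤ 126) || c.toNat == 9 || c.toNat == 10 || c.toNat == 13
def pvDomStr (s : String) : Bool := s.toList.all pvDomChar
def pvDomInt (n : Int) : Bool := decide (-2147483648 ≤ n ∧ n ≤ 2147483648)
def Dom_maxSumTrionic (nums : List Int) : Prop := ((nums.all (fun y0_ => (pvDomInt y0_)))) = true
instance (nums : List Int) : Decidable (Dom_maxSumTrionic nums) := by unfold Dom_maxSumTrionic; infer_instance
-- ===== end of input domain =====

-- B replaces A's quadratic restart-scan with one O(n) pass: precomputed best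
-- increasing-segment sums and descending-run ends, then a single peak scan.

-- Shared indexing helper: Python's nums[j]; `getD` is exact because every
-- access in both programs is guarded to be in range.
def pvG (nums : List Int) (j : Nat) : Int := nums.getD j 0

-- ===== PORT A =====
-- inner while: extend b over the strictly decreasing run, accumulating net
def descendA (nums : List Int) (n b : Nat) (net : Int) : Nat × Int :=
  if b + 1 < n ∧ pvG nums (b+1) < pvG nums b then
    descendA nums n (b+1) (net + pvG nums (b+1))
  else (b, net)
termination_by n - b
decreasing_by omega

-- inner while: extend a left over the strictly increasing run, tracking max prefix sum lx
def leftA (nums : List Int) (a : Nat) (left lx : Int) : Nat × Int :=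
  if 1 ≤ a ∧ pvG nums (a-1) < pvG nums a then
    leftA nums (a-1) (left + pvG nums (a-1)) (max lx (left + pvG nums (a-1)))
  else (a, lx)
termination_by a
decreasing_by omega

-- inner while: extend b right over the strictly increasing run, tracking max prefix sum rx
def rightA (nums : List Int) (n b : Nat) (right rx : Int) : Nat × Int :=
  if b + 1 < n ∧ pvG nums b < pvG nums (b+1) then
    rightA nums n (b+1) (right + pvG nums (b+1)) (max rx (right + pvG nums (b+1)))
  else (b, rx)
termination_by n - b
decreasing_by omega

-- outer while-loop; `fuel` only realises termination (i strictly increases each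
-- iteration, so fuel = n is never exhausted — established in the proofs below)
def outerA (nums : List Int) (n : Nat) : Nat → Nat → Int → Int
  | 0, _, res => res
  | fuel+1, i, res =>
    if i + 2 < n then
      let d := descendA nums n i (pvG nums i)
      if i = d.1 then outerA nums n fuel (i+1) res
      else
        let l := leftA nums i 0 (-(10^18 : Int))
        if l.1 = i then outerA nums n fuel (i+1) res
        else
          let r := rightA nums n d.1 0 (-(10^18 : Int))
          if r.1 = d.1 then outerA nums n fuel (i+1) res
          else outerA nums n fuel r.1 (max res (l.2 + d.2 + r.2))
    else res

def maxSumTrionic (nums : List Int) : Int :=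
  outerA nums nums.length nums.length 1 (-(10^16 : Int))

-- ===== PORT B =====
-- best[i] of Source B: max sum of a strictly-increasing segment ending at i
def bestB (nums : List Int) : Nat → Int
  | 0 => pvG nums 0
  | i+1 =>
    let p := bestB nums i
    pvG nums (i+1) + (if pvG nums i < pvG nums (i+1) ∧ 0 < p then p else 0)

-- rgt[i] of Source B: max sum of a strictly-increasing segment starting at i
def rgtB (nums : List Int) (n i : Nat) : Int :=
  if i + 1 < n then
    let p := rgtB nums n (i+1)
    pvG nums i + (if pvG nums i < pvG nums (i+1) ∧ 0 < p then p else 0)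
  else pvG nums i
termination_by n - i
decreasing_by omega

-- (de[i], dn[i]) of Source B: end index and sum of the maximal strictly-decreasing run from i
def dnB (nums : List Int) (n i : Nat) : Nat × Int :=
  if i + 1 < n ∧ pvG nums (i+1) < pvG nums i then
    let r := dnB nums n (i+1)
    (r.1, pvG nums i + r.2)
  else (i, pvG nums i)
termination_by n - i
decreasing_by omega

-- body of Source B's final peak-scan loop
def stepB (nums : List Int) (n : Nat) (res : Int) (s : Nat) : Int :=
  if pvG nums (s-1) < pvG nums s ∧ pvG nums (s+1) < pvG nums s then
    let d := dnB nums n s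
    if d.1 + 1 < n ∧ pvG nums d.1 < pvG nums (d.1+1) then
      max res (bestB nums (s-1) + d.2 + rgtB nums n (d.1+1))
    else res
  else res

def maxSumTrionic_alt (nums : List Int) : Int :=
  let n := nums.length
  if n < 4 then -(10^16 : Int)
  else (List.range' 1 (n-3)).foldl (stepB nums n) (-(10^16 : Int))

-- ===== PRECONDITION & SPEC =====
def Spec_maxSumTrionic (nums : List Int) (out : Int) : Prop := out = maxSumTrionic_alt nums
instance (nums : List Int) (out : Int) : Decidable (Spec_maxSumTrionic nums out) := by unfold Spec_maxSumTrionic; infer_instance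

-- ===== CLAIM (what is proved, stated in full; the proofs are below) =====
def Claim_equal_maxSumTrionic : Prop := ∀ (nums : List Int), Dom_maxSumTrionic nums → Spec_maxSumTrionic nums (maxSumTrionic nums)

-- ===== LEMMAS AND PROOFS =====

theorem dnB_pos (nums : List Int) (n b : Nat) (hc : b + 1 < n ∧ pvG nums (b+1) < pvG nums b) :
    dnB nums n b = ((dnB nums n (b+1)).1, pvG nums b + (dnB nums n (b+1)).2) := by
  rw [dnB, if_pos hc]

theorem dnB_neg (nums : List Int) (n b : Nat) (hc : ¬ (b + 1 < n ∧ pvG nums (b+1) < pvG nums b)) :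
    dnB nums n b = (b, pvG nums b) := by
  rw [dnB, if_neg hc]

-- descendA is dnB with an accumulator
theorem descendA_eq (nums : List Int) (n : Nat) :
    ∀ k b net, n - b ≤ k →
      descendA nums n b net = ((dnB nums n b).1, net - pvG nums b + (dnB nums n b).2) := by
  intro k
  induction k with
  | zero =>
    intro b net h
    have hc : ¬ (b + 1 < n ∧ pvG nums (b+1) < pvG nums b) := by rintro ⟨h1, _⟩; omega
    rw [descendA, if_neg hc, dnB_neg nums n b hc]
    simp only [Prod.mk.injEq]
    exact ⟨by trivial, by ring⟩
  | succ k ih =>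
    intro b net h
    by_cases hc : b + 1 < n ∧ pvG nums (b+1) < pvG nums b
    · rw [descendA, if_pos hc, dnB_pos nums n b hc, ih (b+1) _ (by omega)]
      simp only [Prod.mk.injEq]
      exact ⟨by trivial, by ring⟩
    · rw [descendA, if_neg hc, dnB_neg nums n b hc]
      simp only [Prod.mk.injEq]
      exact ⟨by trivial, by ring⟩

theorem dnB_fst_ge (nums : List Int) (n : Nat) :
    ∀ k b, n - b ≤ k → b ≤ (dnB nums n b).1 := by
  intro k
  induction k with
  | zero =>
    intro b h
    have hc : ¬ (b + 1 < n ∧ pvG nums (b+1) < pvG nums b) := by rintro ⟨h1, _⟩; omega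
    rw [dnB_neg nums n b hc]
  | succ k ih =>
    intro b h
    by_cases hc : b + 1 < n ∧ pvG nums (b+1) < pvG nums b
    · rw [dnB_pos nums n b hc]
      have := ih (b+1) (by omega)
      show b ≤ (dnB nums n (b+1)).1
      omega
    · rw [dnB_neg nums n b hc]

theorem dnB_chain (nums : List Int) (n : Nat) :
    ∀ k b, n - b ≤ k → ∀ j, b < j → j ≤ (dnB nums n b).1 → pvG nums j < pvG nums (j-1) := by
  intro k
  induction k with
  | zero =>
    intro b h j hj1 hj2
    have hc : ¬ (b + 1 < n ∧ pvG nums (b+1) < pvG nums b) := by rintro ⟨h1, _⟩; omega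
    rw [dnB_neg nums n b hc] at hj2
    omega
  | succ k ih =>
    intro b h j hj1 hj2
    by_cases hc : b + 1 < n ∧ pvG nums (b+1) < pvG nums b
    · rw [dnB_pos nums n b hc] at hj2
      by_cases hj : j = b + 1
      · subst hj; simpa using hc.2
      · exact ih (b+1) (by omega) j (by omega) hj2
    · rw [dnB_neg nums n b hc] at hj2
      omega

theorem dnB_fst_succ (nums : List Int) (n b : Nat)
    (h : b + 1 < n ∧ pvG nums (b+1) < pvG nums b) :
    b + 1 ≤ (dnB nums n b).1 := by
  rw [dnB_pos nums n b h]
  exact dnB_fst_ge nums n (n - (b+1)) (b+1) le_rfl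

-- leftA's stopped form and final index
theorem leftA_stop (nums : List Int) (a : Nat) (left lx : Int)
    (h : ¬ (1 ≤ a ∧ pvG nums (a-1) < pvG nums a)) : leftA nums a left lx = (a, lx) := by
  rw [leftA, if_neg h]

theorem leftA_fst_le (nums : List Int) :
    ∀ a left lx, (leftA nums a left lx).1 ≤ a := by
  intro a
  induction a using Nat.strong_induction_on with
  | _ a ih =>
    intro left lx
    by_cases hc : 1 ≤ a ∧ pvG nums (a-1) < pvG nums a
    · rw [leftA, if_pos hc]
      have := ih (a-1) (by omega) (left + pvG nums (a-1)) (max lx (left + pvG nums (a-1)))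
      omega
    · rw [leftA_stop nums a left lx hc]

theorem leftA_fst_lt (nums : List Int) (a : Nat) (left lx : Int)
    (h : 1 ≤ a ∧ pvG nums (a-1) < pvG nums a) : (leftA nums a left lx).1 < a := by
  rw [leftA, if_pos h]
  have := leftA_fst_le nums (a-1) (left + pvG nums (a-1)) (max lx (left + pvG nums (a-1)))
  omega

-- leftA's tracked maximum is the Kadane value bestB
theorem leftA_snd (nums : List Int) :
    ∀ a left lx, 1 ≤ a → pvG nums (a-1) < pvG nums a →
      (leftA nums a left lx).2 = max lx (left + bestB nums (a-1)) := by
  intro a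
  induction a using Nat.strong_induction_on with
  | _ a ih =>
    intro left lx ha hg
    obtain ⟨a0, rfl⟩ : ∃ a0, a = a0 + 1 := ⟨a - 1, by omega⟩
    have hs : a0 + 1 - 1 = a0 := rfl
    rw [leftA, if_pos ⟨ha, hg⟩, hs]
    by_cases hc : 1 ≤ a0 ∧ pvG nums (a0-1) < pvG nums a0
    · rw [ih a0 (by omega) _ _ hc.1 hc.2]
      obtain ⟨a1, rfl⟩ : ∃ a1, a0 = a1 + 1 := ⟨a0 - 1, by omega⟩
      have hg1 : pvG nums a1 < pvG nums (a1+1) := by simpa using hc.2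
      have hb : bestB nums (a1+1)
          = pvG nums (a1+1) + (if pvG nums a1 < pvG nums (a1+1) ∧ 0 < bestB nums a1 then bestB nums a1 else 0) := rfl
      have hs1 : a1 + 1 - 1 = a1 + 1 - 1 := rfl
      rw [show a1 + 1 - 1 = a1 from rfl, hb]
      simp only [hg1, true_and]
      split_ifs with hp <;> omega
    · rw [leftA_stop nums a0 _ _ hc]
      have hb : bestB nums a0 = pvG nums a0 := by
        match a0 with
        | 0 => rfl
        | a1+1 =>
          have h1 : ¬ (pvG nums a1 < pvG nums (a1+1) ∧ 0 < bestB nums a1) := by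
            intro hcontr
            exact hc ⟨by omega, by simpa using hcontr.1⟩
          show pvG nums (a1+1) + _ = _
          simp [h1]
      show max lx (left + pvG nums a0) = max lx (left + bestB nums a0)
      rw [hb]

-- ascEnd: the index where rightA's while-loop stops
def ascEnd (nums : List Int) (n b : Nat) : Nat :=
  if b + 1 < n ∧ pvG nums b < pvG nums (b+1) then ascEnd nums n (b+1) else b
termination_by n - b
decreasing_by omega

theorem ascEnd_pos (nums : List Int) (n b : Nat) (h : b + 1 < n ∧ pvG nums b < pvG nums (b+1)) :
    ascEnd nums n b = ascEnd nums n (b+1) := by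
  rw [ascEnd, if_pos h]

theorem ascEnd_neg (nums : List Int) (n b : Nat) (h : ¬ (b + 1 < n ∧ pvG nums b < pvG nums (b+1))) :
    ascEnd nums n b = b := by
  rw [ascEnd, if_neg h]

theorem rightA_stop (nums : List Int) (n b : Nat) (right rx : Int)
    (h : ¬ (b + 1 < n ∧ pvG nums b < pvG nums (b+1))) : rightA nums n b right rx = (b, rx) := by
  rw [rightA, if_neg h]

theorem rightA_fst (nums : List Int) (n : Nat) :
    ∀ k b right rx, n - b ≤ k → (rightA nums n b right rx).1 = ascEnd nums n b := by
  intro k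
  induction k with
  | zero =>
    intro b right rx h
    have hc : ¬ (b + 1 < n ∧ pvG nums b < pvG nums (b+1)) := by rintro ⟨h1, _⟩; omega
    rw [rightA_stop nums n b _ _ hc, ascEnd_neg nums n b hc]
  | succ k ih =>
    intro b right rx h
    by_cases hc : b + 1 < n ∧ pvG nums b < pvG nums (b+1)
    · rw [rightA, if_pos hc, ascEnd_pos nums n b hc]
      exact ih (b+1) _ _ (by omega)
    · rw [rightA_stop nums n b _ _ hc, ascEnd_neg nums n b hc]

theorem ascEnd_ge (nums : List Int) (n : Nat) :
    ∀ k b, n - b ≤ k → b ≤ ascEnd nums n b := by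
  intro k
  induction k with
  | zero =>
    intro b h
    have hc : ¬ (b + 1 < n ∧ pvG nums b < pvG nums (b+1)) := by rintro ⟨h1, _⟩; omega
    rw [ascEnd_neg nums n b hc]
  | succ k ih =>
    intro b h
    by_cases hc : b + 1 < n ∧ pvG nums b < pvG nums (b+1)
    · rw [ascEnd_pos nums n b hc]
      have := ih (b+1) (by omega)
      omega
    · rw [ascEnd_neg nums n b hc]

theorem ascEnd_succ (nums : List Int) (n b : Nat)
    (h : b + 1 < n ∧ pvG nums b < pvG nums (b+1)) : b + 1 ≤ ascEnd nums n b := by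
  rw [ascEnd_pos nums n b h]
  exact ascEnd_ge nums n (n - (b+1)) (b+1) le_rfl

theorem ascEnd_lt (nums : List Int) (n : Nat) :
    ∀ k b, n - b ≤ k → b < n → ascEnd nums n b < n := by
  intro k
  induction k with
  | zero =>
    intro b h hb
    have hc : ¬ (b + 1 < n ∧ pvG nums b < pvG nums (b+1)) := by rintro ⟨h1, _⟩; omega
    rw [ascEnd_neg nums n b hc]; omega
  | succ k ih =>
    intro b h hb
    by_cases hc : b + 1 < n ∧ pvG nums b < pvG nums (b+1)
    · rw [ascEnd_pos nums n b hc]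
      exact ih (b+1) (by omega) (by omega)
    · rw [ascEnd_neg nums n b hc]; omega

theorem ascEnd_chain (nums : List Int) (n : Nat) :
    ∀ k b, n - b ≤ k → ∀ j, b ≤ j → j < ascEnd nums n b → pvG nums j < pvG nums (j+1) := by
  intro k
  induction k with
  | zero =>
    intro b h j hj1 hj2
    have hc : ¬ (b + 1 < n ∧ pvG nums b < pvG nums (b+1)) := by rintro ⟨h1, _⟩; omega
    rw [ascEnd_neg nums n b hc] at hj2; omega
  | succ k ih =>
    intro b h j hj1 hj2
    by_cases hc : b + 1 < n ∧ pvG nums b < pvG nums (b+1)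
    · rw [ascEnd_pos nums n b hc] at hj2
      by_cases hj : j = b
      · subst hj; exact hc.2
      · exact ih (b+1) (by omega) j (by omega) hj2
    · rw [ascEnd_neg nums n b hc] at hj2; omega

theorem rgtB_pos (nums : List Int) (n i : Nat) (h : i + 1 < n) :
    rgtB nums n i
      = pvG nums i + (if pvG nums i < pvG nums (i+1) ∧ 0 < rgtB nums n (i+1) then rgtB nums n (i+1) else 0) := by
  rw [rgtB, if_pos h]

theorem rgtB_neg (nums : List Int) (n i : Nat) (h : ¬ i + 1 < n) :
    rgtB nums n i = pvG nums i := by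
  rw [rgtB, if_neg h]

-- rightA's tracked maximum is rgtB
theorem rightA_snd (nums : List Int) (n : Nat) :
    ∀ k b right rx, n - b ≤ k → b + 1 < n → pvG nums b < pvG nums (b+1) →
      (rightA nums n b right rx).2 = max rx (right + rgtB nums n (b+1)) := by
  intro k
  induction k with
  | zero => intro b right rx h hb _; omega
  | succ k ih =>
    intro b right rx h hb hg
    rw [rightA, if_pos ⟨hb, hg⟩]
    by_cases hc : b + 1 + 1 < n ∧ pvG nums (b+1) < pvG nums (b+1+1)
    · rw [ih (b+1) _ _ (by omega) hc.1 hc.2]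
      rw [rgtB_pos nums n (b+1) hc.1]
      simp only [hc.2, true_and]
      split_ifs with hp <;> omega
    · rw [rightA_stop nums n (b+1) _ _ hc]
      have hr : rgtB nums n (b+1) = pvG nums (b+1) := by
        by_cases hn : b + 1 + 1 < n
        · have h1 : ¬ (pvG nums (b+1) < pvG nums (b+1+1) ∧ 0 < rgtB nums n (b+1+1)) := by
            intro hcontr
            exact hc ⟨hn, hcontr.1⟩
          rw [rgtB_pos nums n (b+1) hn, if_neg h1]; ring
        · exact rgtB_neg nums n (b+1) hn
      rw [hr]

theorem bestB_ge (nums : List Int) (i : Nat) : pvG nums i ≤ bestB nums i := by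
  match i with
  | 0 => exact le_rfl
  | i+1 =>
    show pvG nums (i+1) ≤ pvG nums (i+1) + _
    split_ifs with h <;> omega

theorem rgtB_ge (nums : List Int) (n i : Nat) : pvG nums i ≤ rgtB nums n i := by
  by_cases h : i + 1 < n
  · rw [rgtB_pos nums n i h]
    split_ifs with hp <;> omega
  · rw [rgtB_neg nums n i h]

-- the domain bounds every in-range element
theorem dom_bound (nums : List Int) (hd : Dom_maxSumTrionic nums) :
    ∀ i, i < nums.length → -2147483648 ≤ pvG nums i := by
  intro i hi
  unfold Dom_maxSumTrionic at hd
  rw [List.all_eq_true] at hd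
  have hmem : nums.getD i 0 ∈ nums := by
    rw [List.getD_eq_getElem nums 0 hi]
    exact List.getElem_mem hi
  have := hd _ hmem
  unfold pvDomInt at this
  simp only [decide_eq_true_eq] at this
  exact this.1

-- stepB leaves res unchanged where the peak test fails
theorem stepB_not_peak (nums : List Int) (n : Nat) (res : Int) (s : Nat)
    (h : ¬ (pvG nums (s-1) < pvG nums s ∧ pvG nums (s+1) < pvG nums s)) :
    stepB nums n res s = res := by
  simp only [stepB]; rw [if_neg h]

theorem stepB_no_right (nums : List Int) (n : Nat) (res : Int) (s : Nat)
    (h : ¬ ((dnB nums n s).1 + 1 < n ∧ pvG nums (dnB nums n s).1 < pvG nums ((dnB nums n s).1+1))) :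
    stepB nums n res s = res := by
  simp only [stepB]
  split_ifs <;> rfl

theorem stepB_success (nums : List Int) (n : Nat) (res : Int) (s : Nat)
    (h1 : pvG nums (s-1) < pvG nums s ∧ pvG nums (s+1) < pvG nums s)
    (h2 : (dnB nums n s).1 + 1 < n ∧ pvG nums (dnB nums n s).1 < pvG nums ((dnB nums n s).1+1)) :
    stepB nums n res s = max res (bestB nums (s-1) + (dnB nums n s).2 + rgtB nums n ((dnB nums n s).1+1)) := by
  simp only [stepB]
  rw [if_pos h1, if_pos h2]

-- folding stepB over a range of non-peaks is the identity
theorem foldl_step_id (nums : List Int) (n : Nat) :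
    ∀ len lo res, (∀ s, lo ≤ s → s < lo + len → ∀ r, stepB nums n r s = r) →
      (List.range' lo len).foldl (stepB nums n) res = res := by
  intro len
  induction len with
  | zero => intro lo res _; rfl
  | succ len ih =>
    intro lo res h
    rw [List.range'_succ]
    simp only [List.foldl_cons]
    rw [h lo le_rfl (by omega) res]
    exact ih (lo+1) res (fun s hs1 hs2 r => h s (by omega) (by omega) r)

theorem range'_split : ∀ m s k, m ≤ k → List.range' s k = List.range' s m ++ List.range' (s+m) (k-m) := by
  intro m
  induction m with
  | zero => intro s k _; simp
  | succ m ih =>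
    intro s k h
    obtain ⟨k', rfl⟩ : ∃ k', k = k' + 1 := ⟨k - 1, by omega⟩
    have e1 : s + (m + 1) = s + 1 + m := by omega
    have e2 : k' + 1 - (m + 1) = k' - m := by omega
    rw [List.range'_succ, ih (s+1) k' (by omega), List.range'_succ, e1, e2, List.cons_append]

-- outerA unfolded one step
theorem outerA_succ (nums : List Int) (n fuel i : Nat) (res : Int) :
    outerA nums n (fuel+1) i res =
      if i + 2 < n then
        (let d := descendA nums n i (pvG nums i)
         if i = d.1 then outerA nums n fuel (i+1) res
         else
           let l := leftA nums i 0 (-(10^18 : Int))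
           if l.1 = i then outerA nums n fuel (i+1) res
           else
             let r := rightA nums n d.1 0 (-(10^18 : Int))
             if r.1 = d.1 then outerA nums n fuel (i+1) res
             else outerA nums n fuel r.1 (max res (l.2 + d.2 + r.2)))
      else res := rfl

-- THE MAIN LOOP INVARIANT: A's outer loop folds stepB over the remaining peak range
theorem outer_eq (nums : List Int) (hd : Dom_maxSumTrionic nums) :
    ∀ fuel i res, 1 ≤ i → nums.length ≤ i + fuel + 2 →
      outerA nums nums.length fuel i res
        = (List.range' i (nums.length - 2 - i)).foldl (stepB nums nums.length) res := by
  intro fuel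
  induction fuel with
  | zero =>
    intro i res h1 h2
    have hz : nums.length - 2 - i = 0 := by omega
    rw [hz]
    rfl
  | succ fuel ih =>
    intro i res h1 h2
    by_cases hcond : i + 2 < nums.length
    · rw [outerA_succ, if_pos hcond]
      have hde := descendA_eq nums nums.length (nums.length - i) i (pvG nums i) le_rfl
      simp only [hde]
      by_cases hib : i = (dnB nums nums.length i).1
      · -- no descent at i: not a peak, step to i+1
        rw [if_pos hib, ih (i+1) res (by omega) (by omega)]
        have hnd : ¬ (i + 1 < nums.length ∧ pvG nums (i+1) < pvG nums i) := by
          intro hcc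
          have := dnB_fst_succ nums nums.length i hcc
          omega
        have hsplit : nums.length - 2 - i = (nums.length - 2 - (i+1)) + 1 := by omega
        rw [hsplit, List.range'_succ, List.foldl_cons,
            stepB_not_peak nums nums.length res i (fun hpk => hnd ⟨by omega, hpk.2⟩)]
      · rw [if_neg hib]
        have hcd : i + 1 < nums.length ∧ pvG nums (i+1) < pvG nums i := by
          by_contra hnc
          exact hib (by rw [dnB_neg nums nums.length i hnc])
        by_cases hl : (leftA nums i 0 (-(10^18 : Int))).1 = i
        · -- no ascent into i: not a peak, step to i+1
          rw [if_pos hl, ih (i+1) res (by omega) (by omega)]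
          have hnl : ¬ (1 ≤ i ∧ pvG nums (i-1) < pvG nums i) := by
            intro hcc
            have := leftA_fst_lt nums i 0 (-(10^18 : Int)) hcc
            omega
          have hsplit : nums.length - 2 - i = (nums.length - 2 - (i+1)) + 1 := by omega
          rw [hsplit, List.range'_succ, List.foldl_cons,
              stepB_not_peak nums nums.length res i (fun hpk => hnl ⟨h1, hpk.1⟩)]
        · rw [if_neg hl]
          have hcl : pvG nums (i-1) < pvG nums i := by
            by_contra hnc
            exact hl (by rw [leftA_stop nums i 0 (-(10^18 : Int)) (fun hcc => hnc hcc.2)])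
          by_cases hr : (rightA nums nums.length (dnB nums nums.length i).1 0 (-(10^18 : Int))).1
              = (dnB nums nums.length i).1
          · -- no ascent after the descent: step to i+1
            rw [if_pos hr, ih (i+1) res (by omega) (by omega)]
            have hnr : ¬ ((dnB nums nums.length i).1 + 1 < nums.length ∧
                pvG nums (dnB nums nums.length i).1 < pvG nums ((dnB nums nums.length i).1 + 1)) := by
              intro hcc
              have h3 := ascEnd_succ nums nums.length (dnB nums nums.length i).1 hcc
              rw [rightA_fst nums nums.length (nums.length - (dnB nums nums.length i).1)
                  (dnB nums nums.length i).1 0 (-(10^18 : Int)) le_rfl] at hr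
              omega
            have hsplit : nums.length - 2 - i = (nums.length - 2 - (i+1)) + 1 := by omega
            rw [hsplit, List.range'_succ, List.foldl_cons,
                stepB_no_right nums nums.length res i hnr]
          · -- success: a trionic span; record it and jump to the end of the right ascent
            rw [if_neg hr]
            have hce : (dnB nums nums.length i).1 + 1 < nums.length ∧
                pvG nums (dnB nums nums.length i).1 < pvG nums ((dnB nums nums.length i).1 + 1) := by
              by_contra hnc
              exact hr (by rw [rightA_stop nums nums.length (dnB nums nums.length i).1 0
                (-(10^18 : Int)) hnc])
            have he1 : i + 1 ≤ (dnB nums nums.length i).1 := dnB_fst_succ nums nums.length i hcd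
            have hrfst := rightA_fst nums nums.length (nums.length - (dnB nums nums.length i).1)
                (dnB nums nums.length i).1 0 (-(10^18 : Int)) le_rfl
            have hb2 : (dnB nums nums.length i).1 + 1 ≤ ascEnd nums nums.length (dnB nums nums.length i).1 :=
              ascEnd_succ nums nums.length (dnB nums nums.length i).1 hce
            have hb2n : ascEnd nums nums.length (dnB nums nums.length i).1 < nums.length :=
              ascEnd_lt nums nums.length (nums.length - (dnB nums nums.length i).1)
                (dnB nums nums.length i).1 le_rfl (by omega)
            have hl2 : (leftA nums i 0 (-(10^18 : Int))).2 = bestB nums (i-1) := by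
              rw [leftA_snd nums i 0 (-(10^18 : Int)) h1 hcl]
              have hbg := bestB_ge nums (i-1)
              have hdb := dom_bound nums hd (i-1) (by omega)
              omega
            have hr2 : (rightA nums nums.length (dnB nums nums.length i).1 0 (-(10^18 : Int))).2
                = rgtB nums nums.length ((dnB nums nums.length i).1 + 1) := by
              rw [rightA_snd nums nums.length (nums.length - (dnB nums nums.length i).1)
                  (dnB nums nums.length i).1 0 (-(10^18 : Int)) le_rfl hce.1 hce.2]
              have hrg := rgtB_ge nums nums.length ((dnB nums nums.length i).1 + 1)
              have hdb := dom_bound nums hd ((dnB nums nums.length i).1 + 1) hce.1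
              omega
            have hnet : pvG nums i - pvG nums i + (dnB nums nums.length i).2
                = (dnB nums nums.length i).2 := by ring
            rw [hrfst, hl2, hr2, hnet]
            rw [ih (ascEnd nums nums.length (dnB nums nums.length i).1)
                (max res (bestB nums (i-1) + (dnB nums nums.length i).2
                  + rgtB nums nums.length ((dnB nums nums.length i).1 + 1)))
                (by omega) (by omega)]
            -- now transform the RHS fold
            have hsplit : nums.length - 2 - i = (nums.length - 2 - (i+1)) + 1 := by omega
            rw [hsplit, List.range'_succ, List.foldl_cons,
                stepB_success nums nums.length res i ⟨hcl, hcd.2⟩ hce]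
            -- split the remaining range at the jump target
            have hmid : (nums.length - 2 - i - 1) - (nums.length - 2 - ascEnd nums nums.length (dnB nums nums.length i).1)
                ≤ nums.length - 2 - (i+1) := by omega
            rw [range'_split ((nums.length - 2 - i - 1)
                  - (nums.length - 2 - ascEnd nums nums.length (dnB nums nums.length i).1)) (i+1)
                  (nums.length - 2 - (i+1)) (by omega),
                List.foldl_append]
            -- the middle stretch contains no peak
            rw [foldl_step_id nums nums.length _ (i+1) _ ?mid]
            case mid =>
              intro s hs1 hs2 r
              have hslt : s < ascEnd nums nums.length (dnB nums nums.length i).1 := by omega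
              by_cases hse : s ≤ (dnB nums nums.length i).1
              · -- inside the descent: nums[s-1] > nums[s]
                have := dnB_chain nums nums.length (nums.length - i) i le_rfl s (by omega) hse
                exact stepB_not_peak nums nums.length r s (fun hpk => by omega)
              · -- inside the right ascent: nums[s] < nums[s+1]
                have := ascEnd_chain nums nums.length (nums.length - (dnB nums nums.length i).1)
                  (dnB nums nums.length i).1 le_rfl s (by omega) hslt
                exact stepB_not_peak nums nums.length r s (fun hpk => by omega)
            -- the tail range is exactly the range restarted at the jump target
            have htail : List.range' (i + 1 + ((nums.length - 2 - i - 1)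
                  - (nums.length - 2 - ascEnd nums nums.length (dnB nums nums.length i).1)))
                  (nums.length - 2 - (i+1) - ((nums.length - 2 - i - 1)
                  - (nums.length - 2 - ascEnd nums nums.length (dnB nums nums.length i).1)))
                = List.range' (ascEnd nums nums.length (dnB nums nums.length i).1)
                  (nums.length - 2 - ascEnd nums nums.length (dnB nums nums.length i).1) := by
              by_cases hle : ascEnd nums nums.length (dnB nums nums.length i).1 ≤ nums.length - 2
              · have e1 : i + 1 + ((nums.length - 2 - i - 1)
                    - (nums.length - 2 - ascEnd nums nums.length (dnB nums nums.length i).1))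
                    = ascEnd nums nums.length (dnB nums nums.length i).1 := by omega
                have e2 : nums.length - 2 - (i+1) - ((nums.length - 2 - i - 1)
                    - (nums.length - 2 - ascEnd nums nums.length (dnB nums nums.length i).1))
                    = nums.length - 2 - ascEnd nums nums.length (dnB nums nums.length i).1 := by omega
                rw [e1, e2]
              · have hgt : nums.length - 2 < ascEnd nums nums.length (dnB nums nums.length i).1 := by omega
                have e1 : nums.length - 2 - (i+1) - ((nums.length - 2 - i - 1)
                    - (nums.length - 2 - ascEnd nums nums.length (dnB nums nums.length i).1)) = 0 := by omega
                have e2 : nums.length - 2 - ascEnd nums nums.length (dnB nums nums.length i).1 = 0 := by omega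
                rw [e1, e2]
                rfl
            rw [htail]
    · rw [outerA_succ, if_neg hcond]
      have hz : nums.length - 2 - i = 0 := by omega
      rw [hz]
      rfl

-- ===== VERDICT (by name: the statement is the Claim_ definition above) =====
theorem maxSumTrionic_spec : Claim_equal_maxSumTrionic := by
  intro nums hd
  unfold Spec_maxSumTrionic maxSumTrionic maxSumTrionic_alt
  rw [outer_eq nums hd nums.length 1 _ le_rfl (by omega)]
  by_cases h4 : nums.length < 4
  · have h0 : nums.length - 2 - 1 = 0 := by omega
    simp [h4, h0]
  · have h0 : nums.length - 2 - 1 = nums.length - 3 := by omega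
    simp [h4, h0]
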